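-- pv_equiv track=rewrite | github.com/adityakamat24/nervx | nervx/tools/runners.py | _parse_pytest_text_output
-- ===== SOURCE A (Python) =====
-- def _parse_pytest_text_output(output: str, run_id: str) -> str:
--     """Fallback parser for when --json-report isn't available."""
--     text_lines = output.strip().splitlines()
--
--     # Find the summary line — pytest emits things like
--     # "=== 3 passed, 1 failed in 0.42s ===" or "no tests ran in 0.01s".
--     summary = ""
--     summary_tokens = (
--         "passed", "failed", "error", "skipped", "no tests", "deselected",
--     )
--     for line in reversed(text_lines):
--         stripped = line.strip()
--         if not stripped:
--             continue
--         if any(tok in stripped for tok in summary_tokens):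
--             summary = stripped.strip("= ")
--             break
--
--     result: list[str] = [summary or "Could not parse pytest output"]
--     for line in text_lines:
--         if line.startswith("FAILED") or line.startswith("ERROR"):
--             result.append(f"  {line.strip()}")
--     result.append(f"  (raw output: nervx run pytest --raw {run_id})")
--     return "\n".join(result)
-- ===== SOURCE B (Python) =====
-- def _parse_pytest_text_output(output: str, run_id: str) -> str:
--     """Single forward pass: keep the LAST summary-token line seen and collect failures as we go."""
--     tokens = ("passed", "failed", "error", "skipped", "no tests", "deselected")
--     summary = ""
--     failures = []
--     for line in output.strip().splitlines():
--         stripped = line.strip()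
--         if any(tok in stripped for tok in tokens):
--             summary = stripped.strip("= ")
--         if line.startswith("FAILED") or line.startswith("ERROR"):
--             failures.append(f"  {stripped}")
--     parts = [summary or "Could not parse pytest output", *failures,
--              f"  (raw output: nervx run pytest --raw {run_id})"]
--     return "\n".join(parts)
-- ===== Notes on version B (the rewrite author's own statement) =====
-- stated objective: alternative
-- what changed: A scans the lines in reverse with an early break to find the summary and then makes a second pass collecting FAILED/ERROR lines; B makes one forward pass that overwrites a summary candidate on every token match (last match wins) and collects the failure lines in the same loop.
import Mathlib
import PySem

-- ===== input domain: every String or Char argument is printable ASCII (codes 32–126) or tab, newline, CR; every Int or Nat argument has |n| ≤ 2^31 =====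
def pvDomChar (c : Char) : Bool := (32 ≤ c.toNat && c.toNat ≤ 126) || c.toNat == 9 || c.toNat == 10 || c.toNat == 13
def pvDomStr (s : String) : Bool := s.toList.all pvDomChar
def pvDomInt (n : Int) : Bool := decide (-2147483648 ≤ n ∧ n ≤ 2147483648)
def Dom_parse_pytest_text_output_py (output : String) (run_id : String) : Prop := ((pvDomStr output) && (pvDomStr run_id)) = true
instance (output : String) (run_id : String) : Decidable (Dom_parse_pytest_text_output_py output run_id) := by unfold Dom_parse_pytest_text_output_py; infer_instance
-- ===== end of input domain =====

-- B replaces A's reversed-with-break summary scan plus second failure pass by ONE forward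
-- pass that overwrites the summary on every token match and collects failures as it goes
-- (objective: alternative decomposition; same return value).

-- shared data: the summary tokens
def pvTokens : List String :=
  ["passed", "failed", "error", "skipped", "no tests", "deselected"]

-- ===== PORT A =====
-- A's reversed loop with break: first match of the (reversed) list it walks wins
def pvASummary : List String → String
  | [] => ""
  | l :: rest =>
    let stripped := PySem.Str.strip l
    if PySem.Str.len stripped == 0 then pvASummary rest
    else if pvTokens.any (fun t => PySem.Str.isIn t stripped) then
      PySem.Str.stripChars stripped "= "
    else pvASummary rest

def parse_pytest_text_output_py (output : String) (run_id : String) : String :=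
  let text_lines := PySem.Str.splitlines (PySem.Str.strip output)
  let summary := pvASummary text_lines.reverse
  let result : List String := [if summary == "" then "Could not parse pytest output" else summary]
  let result := text_lines.foldl (fun acc line =>
    if PySem.Str.startswith line "FAILED" || PySem.Str.startswith line "ERROR" then
      acc ++ ["  " ++ PySem.Str.strip line]
    else acc) result
  let result := result ++ ["  (raw output: nervx run pytest --raw " ++ run_id ++ ")"]
  PySem.Str.join "\n" result

-- ===== PORT B =====
-- one forward step: update the summary candidate, then maybe append a failure line
def pvBStep (st : String × List String) (line : String) : String × List String :=
  let stripped := PySem.Str.strip line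
  let st1 : String × List String :=
    if pvTokens.any (fun t => PySem.Str.isIn t stripped) then
      (PySem.Str.stripChars stripped "= ", st.2)
    else st
  if PySem.Str.startswith line "FAILED" || PySem.Str.startswith line "ERROR" then
    (st1.1, st1.2 ++ ["  " ++ stripped])
  else st1

def parse_pytest_text_output_py_alt (output : String) (run_id : String) : String :=
  let lines := PySem.Str.splitlines (PySem.Str.strip output)
  let st := lines.foldl pvBStep ("", [])
  let parts : List String :=
    (if st.1 == "" then "Could not parse pytest output" else st.1)
      :: st.2 ++ ["  (raw output: nervx run pytest --raw " ++ run_id ++ ")"]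
  PySem.Str.join "\n" parts

-- ===== PRECONDITION & SPEC =====
def Spec_parse_pytest_text_output_py (output : String) (run_id : String) (out : String) : Prop := out = parse_pytest_text_output_py_alt output run_id
instance (output : String) (run_id : String) (out : String) : Decidable (Spec_parse_pytest_text_output_py output run_id out) := by unfold Spec_parse_pytest_text_output_py; infer_instance

-- ===== CLAIM (what is proved, stated in full; the proofs are below) =====
def Claim_equal_parse_pytest_text_output_py : Prop := ∀ (output : String) (run_id : String), Dom_parse_pytest_text_output_py output run_id → Spec_parse_pytest_text_output_py output run_id (parse_pytest_text_output_py output run_id)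

-- ===== LEMMAS AND PROOFS =====

-- proof-only abbreviations for the three per-line tests/values
def pvP (line : String) : Bool := pvTokens.any (fun t => PySem.Str.isIn t (PySem.Str.strip line))
def pvG (line : String) : String := PySem.Str.stripChars (PySem.Str.strip line) "= "
def pvF (line : String) : Bool :=
  PySem.Str.startswith line "FAILED" || PySem.Str.startswith line "ERROR"

theorem pvP_rfl (x : String) :
    (pvTokens.any fun t => PySem.Str.isIn t (PySem.Str.strip x)) = pvP x := rfl
theorem pvF_rfl (x : String) :
    (PySem.Str.startswith x "FAILED" || PySem.Str.startswith x "ERROR") = pvF x := rfl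

-- a line whose strip has length 0 matches no token
theorem pvP_of_empty_strip (l : String) (h : (PySem.Str.len (PySem.Str.strip l) == 0) = true) :
    pvP l = false := by
  have hnil : (PySem.Str.strip l).toList = [] := by
    have : (PySem.Str.strip l).toList.length = 0 := by
      simpa [PySem.Str.len, PySem.Chars.len] using h
    exact List.eq_nil_of_length_eq_zero this
  have hs : PySem.Str.strip l = "" := by
    have h2 := congrArg String.ofList hnil
    rw [String.ofList_toList] at h2
    exact h2.trans (by decide)
  rw [pvP, hs]
  decide

-- A's reversed-break loop computes the first pvP-match of the list it walks (pvG-mapped)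
theorem pvASummary_eq_find (l : List String) :
    pvASummary l = (match l.find? pvP with | some x => pvG x | none => "") := by
  induction l with
  | nil => rfl
  | cons x rest ih =>
    rw [pvASummary]
    simp only [pvP_rfl]
    by_cases hz : (PySem.Str.len (PySem.Str.strip x) == 0) = true
    · rw [if_pos hz, List.find?_cons_of_neg (by simp [pvP_of_empty_strip x hz]), ih]
    · rw [if_neg hz]
      by_cases hp : pvP x = true
      · simp only [hp, if_true, List.find?_cons_of_pos hp]
        rfl
      · have hp' : pvP x = false := by simpa using hp
        simp only [hp', Bool.false_eq_true, if_false, List.find?_cons_of_neg (by simp [hp'] : ¬ pvP x = true)]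
        exact ih

-- B's summary component: the last forward match is the first match of the reversed list
theorem pvFoldl_last_match (l : List String) (acc : String) :
    l.foldl (fun a line => if pvP line then pvG line else a) acc
      = (match l.reverse.find? pvP with | some x => pvG x | none => acc) := by
  induction l generalizing acc with
  | nil => rfl
  | cons x rest ih =>
    simp only [List.foldl_cons, List.reverse_cons]
    rw [ih, List.find?_append]
    cases hr : rest.reverse.find? pvP with
    | some y => simp
    | none =>
      simp only [Option.none_or]
      by_cases hp : pvP x = true
      · rw [List.find?_cons_of_pos hp]
        simp only [hp, if_true]
      · have hp' : pvP x = false := by simpa using hp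
        rw [List.find?_cons_of_neg (by simp [hp'] : ¬ pvP x = true)]
        simp only [hp', Bool.false_eq_true, if_false]
        rfl

-- the combined B fold splits into the summary fold and the collected failure list
theorem pvBFold_split (l : List String) (s : String) (fs : List String) :
    l.foldl pvBStep (s, fs)
      = (l.foldl (fun a line => if pvP line then pvG line else a) s,
         fs ++ (l.filter pvF).map (fun line => "  " ++ PySem.Str.strip line)) := by
  induction l generalizing s fs with
  | nil => simp
  | cons x rest ih =>
    simp only [List.foldl_cons, List.filter_cons]
    have hstep : pvBStep (s, fs) x
        = ((if pvP x then pvG x else s), fs ++ (if pvF x then ["  " ++ PySem.Str.strip x] else [])) := by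
      rw [pvBStep]
      simp only [pvP_rfl, pvF_rfl]
      by_cases hp : pvP x = true
      · by_cases hf : pvF x = true
        · simp only [hp, hf, if_true]
          rfl
        · have hf' : pvF x = false := by simpa using hf
          simp only [hp, hf', if_true, Bool.false_eq_true, if_false, pvG, List.append_nil]
      · have hp' : pvP x = false := by simpa using hp
        by_cases hf : pvF x = true
        · simp only [hp', hf, if_true, Bool.false_eq_true, if_false]
        · have hf' : pvF x = false := by simpa using hf
          simp only [hp', hf', Bool.false_eq_true, if_false, List.append_nil]
    rw [hstep, ih]
    by_cases hf : pvF x = true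
    · simp only [hf, if_true, List.map_cons]
      simp
    · have hf' : pvF x = false := by simpa using hf
      simp only [hf', Bool.false_eq_true, if_false]
      simp

-- A's failure-collecting fold appends the filtered, mapped lines
theorem pvAFails (l : List String) (r : List String) :
    l.foldl (fun acc line =>
      if PySem.Str.startswith line "FAILED" || PySem.Str.startswith line "ERROR" then
        acc ++ ["  " ++ PySem.Str.strip line]
      else acc) r
    = r ++ (l.filter pvF).map (fun line => "  " ++ PySem.Str.strip line) := by
  induction l generalizing r with
  | nil => simp
  | cons x rest ih =>
    simp only [pvF_rfl] at ih ⊢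
    simp only [List.foldl_cons, List.filter_cons]
    by_cases hf : pvF x = true
    · simp only [hf, if_true]
      rw [ih]
      simp
    · have hf' : pvF x = false := by simpa using hf
      simp only [hf', Bool.false_eq_true, if_false]
      rw [ih]

-- ===== VERDICT (by name: the statement is the Claim_ definition above) =====
set_option maxHeartbeats 1000000 in
theorem parse_pytest_text_output_py_spec : Claim_equal_parse_pytest_text_output_py := by
  intro output run_id _
  show parse_pytest_text_output_py output run_id = parse_pytest_text_output_py_alt output run_id
  simp only [parse_pytest_text_output_py, parse_pytest_text_output_py_alt, pvBFold_split,
    pvAFails, pvFoldl_last_match, pvASummary_eq_find]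
  simp
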